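-- pv_equiv track=rewrite | github.com/ffyuanda/problems | src/ICS_33/quiz4/q4solution.py | slice_gen
-- ===== SOURCE A (Python) =====
-- def slice_gen(iterable, start: int, stop: int, step: int):
--     if start < 0 or stop < 0 or step <= 0:
--         raise AssertionError("illegal input")
--     stepper = 1
--
--     for i in iterable:
--         if start == 0: # at the beginning
--             stepper -= 1
--             if stepper == 0:
--                 yield i
--                 stepper = step
--         else:
--             start -= 1
--
--         if stop == 1: # at the end
--             break
--         else:
--             stop -= 1
-- ===== SOURCE B (Python) =====
-- def slice_gen(iterable, start: int, stop: int, step: int):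
--     if start < 0 or stop < 0 or step <= 0:
--         raise AssertionError("illegal input")
--     seq = list(iterable)
--     if stop != 0:
--         seq = seq[:stop]
--     yield from seq[start::step]
-- ===== Notes on version B (the rewrite author's own statement) =====
-- stated objective: simpler
-- what changed: Replaces A's three decrementing counters (start, stop, stepper) driving a per-element state machine with an upfront truncation to the first stop elements (when stop != 0) followed by the stride slice seq[start::step].
import Mathlib
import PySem

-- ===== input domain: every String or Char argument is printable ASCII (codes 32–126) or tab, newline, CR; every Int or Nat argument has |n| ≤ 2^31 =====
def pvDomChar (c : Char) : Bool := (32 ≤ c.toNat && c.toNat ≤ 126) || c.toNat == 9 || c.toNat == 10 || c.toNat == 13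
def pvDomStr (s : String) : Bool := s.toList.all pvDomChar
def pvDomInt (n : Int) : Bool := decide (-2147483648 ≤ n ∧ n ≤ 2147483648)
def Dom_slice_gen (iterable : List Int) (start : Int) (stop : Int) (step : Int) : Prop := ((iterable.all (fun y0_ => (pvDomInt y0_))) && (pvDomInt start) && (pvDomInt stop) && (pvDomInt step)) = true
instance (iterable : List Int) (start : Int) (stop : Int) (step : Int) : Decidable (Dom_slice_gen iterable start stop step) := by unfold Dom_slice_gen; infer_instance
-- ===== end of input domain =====

-- B replaces A's three decrementing counters with an upfront truncation to `stop` plus the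
-- stride slice seq[start::step] (objective: simpler). Equivalence is about the yielded sequence.

-- ===== PORT A =====
-- the generator loop, step for step: state (start, stop, stepper) evolves exactly as in A
def slice_gen_loop (l : List Int) (start stop step stepper : Int) : List Int :=
  match l with
  | [] => []
  | i :: rest =>
    if start = 0 then
      if stepper - 1 = 0 then
        i :: (if stop = 1 then [] else slice_gen_loop rest start (stop - 1) step step)
      else
        (if stop = 1 then [] else slice_gen_loop rest start (stop - 1) step (stepper - 1))
    else
      (if stop = 1 then [] else slice_gen_loop rest (start - 1) (stop - 1) step stepper)

def slice_gen (iterable : List Int) (start : Int) (stop : Int) (step : Int) : List Int :=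
  -- the guard raises AssertionError in Python; Pre_ excludes those inputs
  if start < 0 ∨ stop < 0 ∨ step ≤ 0 then [] else
    slice_gen_loop iterable start stop step 1

-- ===== PORT B =====
-- seq[start::step] of Source B, ported by hand: exact for 0 ≤ start and 1 ≤ step (as under Pre_)
def strideFrom (step : Int) : List Int → List Int
  | [] => []
  | x :: xs => x :: strideFrom step (xs.drop (step - 1).toNat)
termination_by l => l.length
decreasing_by simp

def slice_gen_alt (iterable : List Int) (start : Int) (stop : Int) (step : Int) : List Int :=
  if start < 0 ∨ stop < 0 ∨ step ≤ 0 then [] else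
    -- seq = seq[:stop] when stop != 0; exact since 0 ≤ stop under Pre_
    let seq := if stop ≠ 0 then iterable.take stop.toNat else iterable
    strideFrom step (seq.drop start.toNat)

-- ===== PRECONDITION & SPEC =====
-- exactly the guard: A raises AssertionError when start < 0, stop < 0 or step <= 0
def Pre_slice_gen (iterable : List Int) (start : Int) (stop : Int) (step : Int) : Prop :=
  0 ≤ start ∧ 0 ≤ stop ∧ 1 ≤ step
instance (iterable : List Int) (start : Int) (stop : Int) (step : Int) : Decidable (Pre_slice_gen iterable start stop step) := by unfold Pre_slice_gen; infer_instance
def pvWitness_slice_gen : List Int × Int × Int × Int := ([3, 1, 4, 1, 5, 9, 2, 6], 1, 7, 2)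

def Spec_slice_gen (iterable : List Int) (start : Int) (stop : Int) (step : Int) (out : List Int) : Prop := out = slice_gen_alt iterable start stop step
instance (iterable : List Int) (start : Int) (stop : Int) (step : Int) (out : List Int) : Decidable (Spec_slice_gen iterable start stop step out) := by unfold Spec_slice_gen; infer_instance

-- ===== CLAIM (what is proved, stated in full; the proofs are below) =====
def Claim_equal_slice_gen : Prop := ∀ (iterable : List Int) (start : Int) (stop : Int) (step : Int), Dom_slice_gen iterable start stop step → Pre_slice_gen iterable start stop step → Spec_slice_gen iterable start stop step (slice_gen iterable start stop step)

-- ===== LEMMAS AND PROOFS =====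

lemma strideFrom_nil (step : Int) : strideFrom step [] = [] := by rw [strideFrom]
lemma strideFrom_cons (step x : Int) (xs : List Int) :
    strideFrom step (x :: xs) = x :: strideFrom step (xs.drop (step - 1).toNat) := by
  rw [strideFrom]

-- A's stepper countdown, in isolation: yields when the counter reaches 1, then resets to step
def strideCnt (step c : Int) : List Int → List Int
  | [] => []
  | x :: xs => if c - 1 = 0 then x :: strideCnt step step xs else strideCnt step (c - 1) xs

lemma strideCnt_eq_strideFrom (l : List Int) : ∀ c step : Int, 1 ≤ c → 1 ≤ step →
    strideCnt step c l = strideFrom step (l.drop (c - 1).toNat) := by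
  induction l with
  | nil => intro c step hc hs; simp [strideCnt, strideFrom_nil]
  | cons x xs ih =>
    intro c step hc hs
    by_cases h : c - 1 = 0
    · have hc1 : (c - 1).toNat = 0 := by omega
      simp only [strideCnt, if_pos h, hc1, List.drop_zero, strideFrom_cons]
      rw [ih step step hs hs]
    · have h1 : (c - 1).toNat = (c - 2).toNat + 1 := by omega
      have h2 : ((x :: xs).drop (c - 1).toNat) = xs.drop (c - 2).toNat := by rw [h1]; simp
      simp only [strideCnt, if_neg h]
      rw [ih (c - 1) step (by omega) hs, h2]
      congr 2
      omega

-- truncation to the first `stop` elements as A's countdown sees it (stop ≤ 0 means no limit)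
def truncTo (stop : Int) (l : List Int) : List Int :=
  if stop ≤ 0 then l else l.take stop.toNat

lemma truncTo_cons (stop : Int) (x : Int) (xs : List Int) (h : stop ≠ 1) :
    truncTo stop (x :: xs) = x :: truncTo (stop - 1) xs := by
  unfold truncTo
  by_cases h0 : stop ≤ 0
  · rw [if_pos h0, if_pos (by omega)]
  · have h1 : stop.toNat = (stop - 1).toNat + 1 := by omega
    rw [if_neg h0, if_neg (by omega), h1]
    simp

lemma truncTo_cons_drop (stop s : Int) (x : Int) (xs : List Int) (h : stop ≠ 1) (hs : 1 ≤ s) :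
    (truncTo stop (x :: xs)).drop s.toNat = (truncTo (stop - 1) xs).drop (s - 1).toNat := by
  rw [truncTo_cons stop x xs h]
  have hsn : s.toNat = (s - 1).toNat + 1 := by omega
  rw [hsn]
  simp

-- the main invariant: A's loop = countdown-stride over the truncated, dropped suffix
lemma loop_eq (l : List Int) : ∀ s stop stepper step : Int,
    0 ≤ s → 1 ≤ stepper → 1 ≤ step →
    slice_gen_loop l s stop step stepper = strideCnt step stepper ((truncTo stop l).drop s.toNat) := by
  induction l with
  | nil => intro s stop stepper step _ _ _; simp [slice_gen_loop, truncTo, strideCnt]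
  | cons i rest ih =>
    intro s stop stepper step hs hc hp
    by_cases hstop : stop = 1
    · subst hstop
      have hT : truncTo 1 (i :: rest) = [i] := by unfold truncTo; norm_num
      by_cases h0 : s = 0
      · subst h0
        by_cases hc1 : stepper - 1 = 0 <;>
          simp [slice_gen_loop, hc1, hT, strideCnt]
      · have hd : ([i] : List Int).drop s.toNat = [] := by
          have h1 : s.toNat = (s - 1).toNat + 1 := by omega
          rw [h1]; simp
        simp [slice_gen_loop, h0, hT, hd, strideCnt]
    · by_cases h0 : s = 0
      · subst h0
        rw [truncTo_cons stop i rest hstop]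
        by_cases hc1 : stepper - 1 = 0
        · simp only [slice_gen_loop, if_pos rfl, if_pos hc1, if_neg hstop, Int.toNat_zero,
            List.drop_zero, strideCnt]
          rw [ih 0 (stop - 1) step step le_rfl hp hp]
          simp
        · simp only [slice_gen_loop, if_pos rfl, if_neg hc1, if_neg hstop, Int.toNat_zero,
            List.drop_zero, strideCnt, if_neg hc1]
          rw [ih 0 (stop - 1) (stepper - 1) step le_rfl (by omega) hp]
          simp
      · rw [truncTo_cons_drop stop s i rest hstop (by omega)]
        simp only [slice_gen_loop, if_neg h0, if_neg hstop]
        exact ih (s - 1) (stop - 1) stepper step (by omega) hc hp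

-- ===== VERDICT (by name: the statement is the Claim_ definition above) =====
theorem slice_gen_spec : Claim_equal_slice_gen := by
  intro iterable start stop step _ hpre
  obtain ⟨hs, ht, hp⟩ := hpre
  unfold Spec_slice_gen slice_gen slice_gen_alt
  rw [if_neg (by omega), if_neg (by omega)]
  rw [loop_eq iterable start stop 1 step hs le_rfl hp,
      strideCnt_eq_strideFrom _ 1 step le_rfl hp]
  have hT : truncTo stop iterable = if stop ≠ 0 then iterable.take stop.toNat else iterable := by
    unfold truncTo
    by_cases h : stop = 0
    · simp [h]
    · rw [if_pos h, if_neg (by omega)]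
  rw [hT]
  simp
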